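-- pv_equiv track=rewrite | github.com/haribari01/JBNU_PPP_2024 | ppp_hw_check/hw11_2_rain_event.py | total_rainfall_event
-- ===== SOURCE A (Python) =====
-- def total_rainfall_event(rainfall):
--     rain_event = []
--     prev_rain_count = 0
--     prev_rain = 0
--     for i in range(len(rainfall)):
--         rain = rainfall[i]
--         if rain == 0:
--             if prev_rain_count > 0:
--                 rain_event.append(prev_rain)
--             prev_rain_count = 0
--             prev_rain = 0
--         else:
--             prev_rain_count += 1
--             prev_rain += rain
--             # 비가오는데 마지막날이다? 이벤트하나 추가해줌.
--             if i == len(rainfall) - 1: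
--                 rain_event.append(prev_rain)
--     return max(rain_event)
-- ===== SOURCE B (Python) =====
-- def total_rainfall_event(rainfall):
--     # segment-then-reduce: collect sums of maximal nonzero runs, return their max
--     event_sums = []
--     i = 0
--     n = len(rainfall)
--     while i < n:
--         if rainfall[i] == 0:
--             i += 1
--         else:
--             j = i
--             s = 0
--             while j < n and rainfall[j] != 0:
--                 s += rainfall[j]
--                 j += 1
--             event_sums.append(s)
--             i = j
--     return max(event_sums)
-- ===== Notes on version B (the rewrite author's own statement) =====
-- stated objective: simpler
-- what changed: Replaces the single-pass prev_rain/prev_rain_count accumulator loop with its last-day special case by a segment-then-reduce scan: skip zeros, consume each maximal nonzero run with an inner loop into a run sum, then take max of the run sums.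
import Mathlib
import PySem

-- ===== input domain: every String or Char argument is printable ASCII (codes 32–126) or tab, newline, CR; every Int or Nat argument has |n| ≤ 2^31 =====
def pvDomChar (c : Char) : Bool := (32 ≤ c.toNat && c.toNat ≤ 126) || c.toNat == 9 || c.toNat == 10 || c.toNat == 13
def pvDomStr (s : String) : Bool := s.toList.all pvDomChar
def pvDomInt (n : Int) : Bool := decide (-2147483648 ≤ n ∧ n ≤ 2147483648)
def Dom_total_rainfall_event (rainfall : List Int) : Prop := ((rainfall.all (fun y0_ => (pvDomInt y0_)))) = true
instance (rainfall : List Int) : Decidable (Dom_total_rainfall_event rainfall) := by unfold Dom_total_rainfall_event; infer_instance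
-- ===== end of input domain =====

-- B replaces A's accumulator loop (prev_rain/prev_rain_count with a last-day special case)
-- by a segment-then-reduce scan over maximal nonzero runs; equal return value on Pre_.

-- ===== PORT A =====
-- loop body of A's 'for i in range(len(rainfall))'; state = (rain_event, prev_rain_count, prev_rain)
def pvAStep (rainfall : List Int) (st : List Int × Int × Int) (i : Int) : List Int × Int × Int :=
  let rain := PySem.List.pyGetD rainfall i 0   -- rainfall[i]; i always in range here
  if rain = 0 then
    ((if st.2.1 > 0 then st.1 ++ [st.2.2] else st.1), 0, 0)
  else
    let pc := st.2.1 + 1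
    let pr := st.2.2 + rain
    ((if i = (rainfall.length : Int) - 1 then st.1 ++ [pr] else st.1), pc, pr)

def total_rainfall_event (rainfall : List Int) : Int :=
  (PySem.List.max? ((PySem.List.pyRange 0 (rainfall.length : Int) 1).foldl
      (pvAStep rainfall) ([], 0, 0)).1 (fun x => x)).getD 0   -- max(rain_event); Pre_ excludes the empty case (ValueError)

-- ===== PORT B =====
-- B's outer while loop: skip a zero, or consume one maximal nonzero run (inner while = takeWhile/dropWhile) and record its sum
def pvRuns : List Int → List Int
  | [] => []
  | x :: xs =>
    if x = 0 then pvRuns xs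
    else (x + (xs.takeWhile (fun y => y ≠ 0)).sum) :: pvRuns (xs.dropWhile (fun y => y ≠ 0))
termination_by l => l.length
decreasing_by
  · simp
  · exact Nat.lt_succ_of_le (List.length_dropWhile_le _ _)

def total_rainfall_event_alt (rainfall : List Int) : Int :=
  (PySem.List.max? (pvRuns rainfall) (fun x => x)).getD 0   -- max(event_sums); Pre_ excludes the empty case

-- ===== PRECONDITION & SPEC =====
-- Pre_ excludes exactly the inputs with no nonzero entry, where Python A (and B) raise ValueError from max([]).
def Pre_total_rainfall_event (rainfall : List Int) : Prop := rainfall.any (fun x => x != 0) = true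
instance (rainfall : List Int) : Decidable (Pre_total_rainfall_event rainfall) := by unfold Pre_total_rainfall_event; infer_instance
def pvWitness_total_rainfall_event : List Int := [1, 0, 2, 3]

def Spec_total_rainfall_event (rainfall : List Int) (out : Int) : Prop := out = total_rainfall_event_alt rainfall
instance (rainfall : List Int) (out : Int) : Decidable (Spec_total_rainfall_event rainfall out) := by unfold Spec_total_rainfall_event; infer_instance

-- ===== CLAIM (what is proved, stated in full; the proofs are below) =====
def Claim_equal_total_rainfall_event : Prop := ∀ (rainfall : List Int), Dom_total_rainfall_event rainfall → Pre_total_rainfall_event rainfall → Spec_total_rainfall_event rainfall (total_rainfall_event rainfall)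

-- ===== LEMMAS AND PROOFS =====

-- proof helper: the event list A's loop produces from open-run state (pc, pr) on the remaining suffix
def pvEv (pc pr : Int) : List Int → List Int
  | [] => []
  | [x] => if x = 0 then (if pc > 0 then [pr] else []) else [pr + x]
  | x :: y :: rest =>
      if x = 0 then (if pc > 0 then pr :: pvEv 0 0 (y :: rest) else pvEv 0 0 (y :: rest))
      else pvEv (pc + 1) (pr + x) (y :: rest)

lemma pvEv_cons_zero (pc pr : Int) (rest : List Int) :
    pvEv pc pr (0 :: rest) = if pc > 0 then pr :: pvEv 0 0 rest else pvEv 0 0 rest := by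
  cases rest <;> simp [pvEv]

lemma pvEv_single (pc pr x : Int) (hx : x ≠ 0) : pvEv pc pr [x] = [pr + x] := by
  simp [pvEv, hx]

lemma pvEv_cons_cons (pc pr x y : Int) (rest : List Int) (hx : x ≠ 0) :
    pvEv pc pr (x :: y :: rest) = pvEv (pc + 1) (pr + x) (y :: rest) := by
  simp [pvEv, hx]

-- pvEv vs pvRuns: closed run state gives pvRuns; open run state prepends the completed run sum
lemma pvEv_spec (n : Nat) : ∀ l : List Int, l.length ≤ n →
    (pvEv 0 0 l = pvRuns l) ∧
    (∀ pc pr : Int, 0 < pc → l ≠ [] →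
      pvEv pc pr l = (pr + (l.takeWhile (fun y => y ≠ 0)).sum) :: pvRuns (l.dropWhile (fun y => y ≠ 0))) := by
  induction n with
  | zero =>
    intro l hl
    have hnil : l = [] := List.eq_nil_of_length_eq_zero (Nat.le_zero.mp hl)
    subst hnil
    exact ⟨by simp [pvEv, pvRuns], fun _ _ _ h => absurd rfl h⟩
  | succ n ih =>
    intro l hl
    cases l with
    | nil => exact ⟨by simp [pvEv, pvRuns], fun _ _ _ h => absurd rfl h⟩
    | cons x xs =>
      have hxs : xs.length ≤ n := by simpa using hl
      by_cases hx : x = 0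
      · subst hx
        constructor
        · rw [pvEv_cons_zero]
          simp [pvRuns, (ih xs hxs).1]
        · intro pc pr hpc _
          rw [pvEv_cons_zero]
          simp only [if_pos hpc]
          simp [pvRuns, (ih xs hxs).1, List.takeWhile, List.dropWhile]
      · cases xs with
        | nil =>
          constructor
          · rw [pvEv_single 0 0 x hx]
            simp [pvRuns, hx]
          · intro pc pr _ _
            rw [pvEv_single pc pr x hx]
            simp [pvRuns, hx, List.takeWhile, List.dropWhile]
        | cons y rest =>
          have key : ∀ pc pr : Int, 0 ≤ pc → pvEv pc pr (x :: y :: rest) =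
              (pr + x + ((y :: rest).takeWhile (fun z => z ≠ 0)).sum)
                :: pvRuns ((y :: rest).dropWhile (fun z => z ≠ 0)) := by
            intro pc pr hpc
            rw [pvEv_cons_cons pc pr x y rest hx]
            exact (ih (y :: rest) hxs).2 (pc + 1) (pr + x) (by omega) (by simp)
          constructor
          · rw [key 0 0 (by omega), pvRuns]
            simp [hx]
          · intro pc pr hpc _
            rw [key pc pr (by omega)]
            simp [List.takeWhile, List.dropWhile, hx, add_assoc]

-- A's loop over range(k, n) from state (ev, pc, pr) appends exactly pvEv pc pr (drop k)
lemma pvFold_eq (rainfall : List Int) : ∀ (m k : Nat), rainfall.length - k ≤ m →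
    ∀ (ev : List Int) (pc pr : Int),
    ((PySem.List.pyRange (k : Int) (rainfall.length : Int) 1).foldl (pvAStep rainfall) (ev, pc, pr)).1
      = ev ++ pvEv pc pr (rainfall.drop k) := by
  intro m
  induction m with
  | zero =>
    intro k hk ev pc pr
    have hge : rainfall.length ≤ k := by omega
    rw [PySem.List.pyRange_one_eq_nil (by exact_mod_cast hge)]
    simp [List.drop_eq_nil_of_le hge, pvEv]
  | succ m ih =>
    intro k hk ev pc pr
    by_cases hlt : k < rainfall.length
    · rw [PySem.List.pyRange_one_cons (by exact_mod_cast hlt)]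
      have hcast : ((k : Int) + 1) = ((k + 1 : Nat) : Int) := by push_cast; ring
      have hdrop : rainfall.drop k = rainfall[k] :: rainfall.drop (k + 1) :=
        (List.getElem_cons_drop hlt).symm
      have hget : PySem.List.pyGetD rainfall (k : Int) 0 = rainfall[k] := by
        simp [PySem.List.pyGetD_natCast, List.getElem?_eq_getElem hlt]
      rw [List.foldl_cons, hcast]
      by_cases hz : rainfall[k] = 0
      · have hstep : pvAStep rainfall (ev, pc, pr) (k : Int)
            = ((if pc > 0 then ev ++ [pr] else ev), 0, 0) := by
          simp [pvAStep, hget, hz]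
        rw [hstep, ih (k + 1) (by omega)]
        rw [hdrop, hz, pvEv_cons_zero]
        by_cases hpc : pc > 0 <;> simp [hpc]
      · by_cases hlast : k + 1 = rainfall.length
        · have hrest : rainfall.drop (k + 1) = [] := List.drop_eq_nil_of_le (by omega)
          have hstep : pvAStep rainfall (ev, pc, pr) (k : Int)
              = (ev ++ [pr + rainfall[k]], pc + 1, pr + rainfall[k]) := by
            simp only [pvAStep, hget, if_neg hz]
            have : (k : Int) = (rainfall.length : Int) - 1 := by omega
            simp [this]
          rw [hstep, ih (k + 1) (by omega)]
          rw [hdrop, hrest, pvEv_single _ _ _ hz]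
          simp [pvEv]
        · have hstep : pvAStep rainfall (ev, pc, pr) (k : Int)
              = (ev, pc + 1, pr + rainfall[k]) := by
            simp only [pvAStep, hget, if_neg hz]
            have : ¬ ((k : Int) = (rainfall.length : Int) - 1) := by omega
            simp [this]
          rw [hstep, ih (k + 1) (by omega)]
          rw [hdrop]
          have hrest : rainfall.drop (k + 1) ≠ [] := by
            simp [List.drop_eq_nil_iff]; omega
          match hr : rainfall.drop (k + 1) with
          | [] => exact absurd hr hrest
          | y :: rest => rw [pvEv_cons_cons _ _ _ _ _ hz]
    · have hge : rainfall.length ≤ k := by omega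
      rw [PySem.List.pyRange_one_eq_nil (by exact_mod_cast hge)]
      simp [List.drop_eq_nil_of_le hge, pvEv]

-- ===== VERDICT (by name: the statement is the Claim_ definition above) =====
theorem total_rainfall_event_spec : Claim_equal_total_rainfall_event := by
  intro rainfall _ _
  unfold Spec_total_rainfall_event total_rainfall_event total_rainfall_event_alt
  have h0 := pvFold_eq rainfall rainfall.length 0 (by omega) [] 0 0
  simp only [Nat.cast_zero] at h0
  rw [h0]
  simp only [List.nil_append, List.drop_zero]
  rw [(pvEv_spec rainfall.length rainfall (le_refl _)).1]
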